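-- pv_equiv track=rewrite | github.com/vertelab/odoo-edi | edi_gs1/old/ica_mrpjournal/wizard/create_label (kopia).py | makeSSCC
-- ===== SOURCE A (Python) =====
-- def makeSSCC(nr):
-- # http://gs1.se/sv/GS1-systemet/Berakna-kontrollsiffra/Sa-beraknas-kontrollsiffran/
--     prefix = 3
--     ftgnr  = 7350031
--
--     sscc = str(prefix) + str(ftgnr) + '%09d' % nr
--     # 37350031000000190
--     first  = sscc[::-2]  # Varannan siffra fran hoger 010003033
--     second = sscc[1::2]   # Resten av siffrorna
--
--     first_tot = 0
--     second_tot = 0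
--
--     for i in first:
--         first_tot += int(i)
--     first_tot = first_tot * 3
--
--     for i in second:
--         second_tot += int(i)
--
--     checksum = 10 - (first_tot + second_tot) % 10
--     if checksum == 10 or checksum < 0:
--         checksum = 0
--     sscc = sscc + "%1d" % checksum
--
--     return sscc
-- ===== SOURCE B (Python) =====
-- def makeSSCC(nr):
--     # Single fused weighted pass over the digits instead of two slice-partition
--     # loops; modular arithmetic replaces the checksum guard.
--     sscc = '37350031' + '%09d' % nr
--     L = len(sscc)
--     total = 0
--     for i, d in enumerate(sscc):
--         total += int(d) * (3 * ((L - 1 - i) % 2 == 0) + (i % 2 == 1))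
--     return sscc + '%1d' % ((10 - total % 10) % 10)
-- ===== Notes on version B (the rewrite author's own statement) =====
-- stated objective: simpler
-- what changed: Replaces A's two slice partitions (every-other-from-the-right and odd-index) and two accumulator loops by a single fused enumerate pass with parity weights, and replaces the checksum overflow guard by a modular reduction.
import Mathlib
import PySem

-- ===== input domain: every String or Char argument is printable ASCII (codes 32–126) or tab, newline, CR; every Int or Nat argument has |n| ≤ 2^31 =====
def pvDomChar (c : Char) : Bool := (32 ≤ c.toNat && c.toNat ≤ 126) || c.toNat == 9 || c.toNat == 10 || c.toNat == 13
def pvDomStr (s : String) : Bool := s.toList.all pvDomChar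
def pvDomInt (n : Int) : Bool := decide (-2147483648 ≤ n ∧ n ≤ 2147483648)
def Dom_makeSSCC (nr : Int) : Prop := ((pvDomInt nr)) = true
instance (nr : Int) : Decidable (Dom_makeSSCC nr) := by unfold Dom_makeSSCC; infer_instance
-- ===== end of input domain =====

-- B replaces A's two slice-partition loops by one fused weighted pass and the
-- checksum guard by modular arithmetic (objective: simpler; no speed claim).

-- int(c) for a single char; the default branch is only reachable where Python
-- raises ValueError (a non-digit char), which Pre_makeSSCC excludes (negative nr).
def pvDig (c : Char) : Int := (PySem.Int.ofChars? [c]).getD 0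

-- ===== PORT A =====
-- the zero-padded format of nr is ported as zfill of str(nr), exact for every int;
-- the single-digit format of checksum is ported as str(checksum), exact here.
def makeSSCC (nr : Int) : String :=
  let pfx : Int := 3            -- `prefix` (Lean keyword)
  let ftgnr : Int := 7350031
  let sscc : List Char :=
    PySem.Int.toChars pfx ++ PySem.Int.toChars ftgnr ++ PySem.Chars.zfill (PySem.Int.toChars nr) 9
  let first : List Char := (PySem.List.slice? sscc none none (-2)).getD []   -- sscc[::-2]
  let second : List Char := (PySem.List.slice? sscc (some 1) none 2).getD [] -- sscc[1::2]
  let first_tot : Int := first.foldl (fun acc i => acc + pvDig i) 0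
  let first_tot := first_tot * 3
  let second_tot : Int := second.foldl (fun acc i => acc + pvDig i) 0
  let checksum : Int := 10 - PySem.Int.mod (first_tot + second_tot) 10
  let checksum := if checksum = 10 ∨ checksum < 0 then 0 else checksum
  String.ofList (sscc ++ PySem.Int.toChars checksum)

-- ===== PORT B =====
def makeSSCC_alt (nr : Int) : String :=
  let sscc : List Char := "37350031".toList ++ PySem.Chars.zfill (PySem.Int.toChars nr) 9
  let L : Int := PySem.List.len sscc
  let total : Int :=
    (PySem.List.enumerate sscc 0).foldl
      (fun total p =>
        total + pvDig p.2 * ((if PySem.Int.mod (L - 1 - p.1) 2 = 0 then 3 else 0) +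
                             (if PySem.Int.mod p.1 2 = 1 then 1 else 0))) 0
  String.ofList (sscc ++ PySem.Int.toChars (PySem.Int.mod (10 - PySem.Int.mod total 10) 10))

-- ===== PRECONDITION & SPEC =====
-- Pre_ excludes negative nr: there the zero-padded field contains a minus sign and
-- both A and B raise ValueError when int() meets it.
def Pre_makeSSCC (nr : Int) : Prop := 0 ≤ nr
instance (nr : Int) : Decidable (Pre_makeSSCC nr) := by unfold Pre_makeSSCC; infer_instance
def pvWitness_makeSSCC : Int := 190
def Spec_makeSSCC (nr : Int) (out : String) : Prop := out = makeSSCC_alt nr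
instance (nr : Int) (out : String) : Decidable (Spec_makeSSCC nr out) := by unfold Spec_makeSSCC; infer_instance

-- ===== CLAIM (what is proved, stated in full; the proofs are below) =====
def Claim_equal_makeSSCC : Prop := ∀ (nr : Int), Dom_makeSSCC nr → Pre_makeSSCC nr → Spec_makeSSCC nr (makeSSCC nr)

-- ===== LEMMAS AND PROOFS =====

lemma pvExplode9 (q : List Char) (h : q.length = 9) :
    ∃ a1 a2 a3 a4 a5 a6 a7 a8 a9, q = [a1,a2,a3,a4,a5,a6,a7,a8,a9] := by
  rcases q with _|⟨a1,q⟩; · simp at h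
  rcases q with _|⟨a2,q⟩; · simp at h
  rcases q with _|⟨a3,q⟩; · simp at h
  rcases q with _|⟨a4,q⟩; · simp at h
  rcases q with _|⟨a5,q⟩; · simp at h
  rcases q with _|⟨a6,q⟩; · simp at h
  rcases q with _|⟨a7,q⟩; · simp at h
  rcases q with _|⟨a8,q⟩; · simp at h
  rcases q with _|⟨a9,q⟩; · simp at h
  rcases q with _|⟨z,q⟩
  · exact ⟨a1,a2,a3,a4,a5,a6,a7,a8,a9, rfl⟩
  · simp at h
lemma pvExplode10 (q : List Char) (h : q.length = 10) :
    ∃ a1 a2 a3 a4 a5 a6 a7 a8 a9 a10, q = [a1,a2,a3,a4,a5,a6,a7,a8,a9,a10] := by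
  rcases q with _|⟨a1,q⟩; · simp at h
  rcases q with _|⟨a2,q⟩; · simp at h
  rcases q with _|⟨a3,q⟩; · simp at h
  rcases q with _|⟨a4,q⟩; · simp at h
  rcases q with _|⟨a5,q⟩; · simp at h
  rcases q with _|⟨a6,q⟩; · simp at h
  rcases q with _|⟨a7,q⟩; · simp at h
  rcases q with _|⟨a8,q⟩; · simp at h
  rcases q with _|⟨a9,q⟩; · simp at h
  rcases q with _|⟨a10,q⟩; · simp at h
  rcases q with _|⟨z,q⟩
  · exact ⟨a1,a2,a3,a4,a5,a6,a7,a8,a9,a10, rfl⟩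
  · simp at h
lemma pvSliceRev17 (c0 c1 c2 c3 c4 c5 c6 c7 c8 c9 c10 c11 c12 c13 c14 c15 c16 : Char) :
    PySem.List.slice? [c0,c1,c2,c3,c4,c5,c6,c7,c8,c9,c10,c11,c12,c13,c14,c15,c16] none none (-2) = some [c16,c14,c12,c10,c8,c6,c4,c2,c0] := by
  norm_num [PySem.List.slice?, PySem.List.sliceIndices]
  norm_num [show Int.toNat 2 = 2 from rfl, show Int.toNat 3 = 3 from rfl, show Int.toNat 4 = 4 from rfl, show Int.toNat 5 = 5 from rfl, show Int.toNat 6 = 6 from rfl, show Int.toNat 7 = 7 from rfl, show Int.toNat 8 = 8 from rfl, show Int.toNat 9 = 9 from rfl, show Int.toNat 10 = 10 from rfl, show Int.toNat 11 = 11 from rfl, List.range_succ, List.filterMap_append, List.filterMap_cons]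
  all_goals and_intros <;> rfl
lemma pvSliceOdd17 (c0 c1 c2 c3 c4 c5 c6 c7 c8 c9 c10 c11 c12 c13 c14 c15 c16 : Char) :
    PySem.List.slice? [c0,c1,c2,c3,c4,c5,c6,c7,c8,c9,c10,c11,c12,c13,c14,c15,c16] (some 1) none 2 = some [c1,c3,c5,c7,c9,c11,c13,c15] := by
  norm_num [PySem.List.slice?, PySem.List.sliceIndices]
  norm_num [show Int.toNat 2 = 2 from rfl, show Int.toNat 3 = 3 from rfl, show Int.toNat 4 = 4 from rfl, show Int.toNat 5 = 5 from rfl, show Int.toNat 6 = 6 from rfl, show Int.toNat 7 = 7 from rfl, show Int.toNat 8 = 8 from rfl, show Int.toNat 9 = 9 from rfl, show Int.toNat 10 = 10 from rfl, show Int.toNat 11 = 11 from rfl, List.range_succ, List.filterMap_append, List.filterMap_cons]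
  all_goals and_intros <;> rfl
lemma pvSliceRev18 (c0 c1 c2 c3 c4 c5 c6 c7 c8 c9 c10 c11 c12 c13 c14 c15 c16 c17 : Char) :
    PySem.List.slice? [c0,c1,c2,c3,c4,c5,c6,c7,c8,c9,c10,c11,c12,c13,c14,c15,c16,c17] none none (-2) = some [c17,c15,c13,c11,c9,c7,c5,c3,c1] := by
  norm_num [PySem.List.slice?, PySem.List.sliceIndices]
  norm_num [show Int.toNat 2 = 2 from rfl, show Int.toNat 3 = 3 from rfl, show Int.toNat 4 = 4 from rfl, show Int.toNat 5 = 5 from rfl, show Int.toNat 6 = 6 from rfl, show Int.toNat 7 = 7 from rfl, show Int.toNat 8 = 8 from rfl, show Int.toNat 9 = 9 from rfl, show Int.toNat 10 = 10 from rfl, show Int.toNat 11 = 11 from rfl, List.range_succ, List.filterMap_append, List.filterMap_cons]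
  all_goals and_intros <;> rfl
lemma pvSliceOdd18 (c0 c1 c2 c3 c4 c5 c6 c7 c8 c9 c10 c11 c12 c13 c14 c15 c16 c17 : Char) :
    PySem.List.slice? [c0,c1,c2,c3,c4,c5,c6,c7,c8,c9,c10,c11,c12,c13,c14,c15,c16,c17] (some 1) none 2 = some [c1,c3,c5,c7,c9,c11,c13,c15,c17] := by
  norm_num [PySem.List.slice?, PySem.List.sliceIndices]
  norm_num [show Int.toNat 2 = 2 from rfl, show Int.toNat 3 = 3 from rfl, show Int.toNat 4 = 4 from rfl, show Int.toNat 5 = 5 from rfl, show Int.toNat 6 = 6 from rfl, show Int.toNat 7 = 7 from rfl, show Int.toNat 8 = 8 from rfl, show Int.toNat 9 = 9 from rfl, show Int.toNat 10 = 10 from rfl, show Int.toNat 11 = 11 from rfl, List.range_succ, List.filterMap_append, List.filterMap_cons]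
  all_goals and_intros <;> rfl

-- ===== VERDICT (by name: the statement is the Claim_ definition above) =====
theorem makeSSCC_spec : Claim_equal_makeSSCC := by
  intro nr hdom hpre
  have hnn : 0 ≤ nr := hpre
  have hub : nr ≤ 2147483648 := by
    unfold Dom_makeSSCC pvDomInt at hdom
    simp only [decide_eq_true_eq] at hdom
    exact hdom.2
  have hlen10 : (PySem.Int.toChars nr).length ≤ 10 := by
    unfold PySem.Int.toChars
    rw [if_neg (by omega)]
    exact Nat.toDigits_length 10 nr.toNat 10 (by norm_num) (by omega)
  have hfl : (PySem.Chars.zfill (PySem.Int.toChars nr) 9).length = 9 ∨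
      (PySem.Chars.zfill (PySem.Int.toChars nr) 9).length = 10 := by
    rw [PySem.Chars.length_zfill]; omega
  unfold Spec_makeSSCC makeSSCC makeSSCC_alt
  dsimp only
  generalize hq : PySem.Chars.zfill (PySem.Int.toChars nr) 9 = q at hfl ⊢
  rw [show PySem.Int.toChars 3 = ['3'] from by decide,
      show PySem.Int.toChars 7350031 = ['7','3','5','0','0','3','1'] from by decide,
      show "37350031".toList = ['3','7','3','5','0','0','3','1'] from by decide]
  rcases hfl with h | h
  · obtain ⟨a1,a2,a3,a4,a5,a6,a7,a8,a9,rfl⟩ := pvExplode9 q h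
    simp only [List.cons_append, List.nil_append]
    rw [pvSliceRev17, pvSliceOdd17]
    simp only [Option.getD_some, List.foldl, PySem.List.enumerate_cons,
      PySem.List.enumerate_nil, PySem.List.len_eq, List.length_cons, List.length_nil]
    norm_num [PySem.Int.mod_eq_emod_of_pos]
    refine congrArg String.ofList ?_
    simp only [List.cons.injEq, true_and]
    refine congrArg PySem.Int.toChars ?_
    split_ifs <;> omega
  · obtain ⟨a1,a2,a3,a4,a5,a6,a7,a8,a9,a10,rfl⟩ := pvExplode10 q h
    simp only [List.cons_append, List.nil_append]
    rw [pvSliceRev18, pvSliceOdd18]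
    simp only [Option.getD_some, List.foldl, PySem.List.enumerate_cons,
      PySem.List.enumerate_nil, PySem.List.len_eq, List.length_cons, List.length_nil]
    norm_num [PySem.Int.mod_eq_emod_of_pos]
    refine congrArg String.ofList ?_
    simp only [List.cons.injEq, true_and]
    refine congrArg PySem.Int.toChars ?_
    split_ifs <;> omega
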